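-- pv_equiv track=rewrite | github.com/amiel349/Research_Algorithms | EX3/Q1.py | bounded_subsets_not_sorted
-- ===== SOURCE A (Python) =====
-- import itertools
--
-- def bounded_subsets_not_sorted(s, c):
--     """
--     the method call the generator from itertools than
--     it itarate it and every time the generator is called it return the next subset smaller than c
--     :param s: list of integers
--     :param c: target number to be the bound of the subsets
--     :return: generator with all the subsets smaller than c
--     """
--     size = 1
--     sum_of_s = 0
--     for i in range(len(s)):
--         sum_of_s += s[i]
--         size += 1
--         if sum_of_s > c:
--             break
--
--     for sub_set in itertools.chain.from_iterable(sorted(itertools.combinations(s, r), key=sum) for r in range(size)):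
--         if sum(sub_set) <= c:
--             yield list(sub_set)
-- ===== SOURCE B (Python) =====
-- from itertools import accumulate
--
-- def _combs_le(items, start, r, c):
--     # size-r subsets of items[start:] (index-lexicographic order) whose sum is <= c,
--     # threading the remaining budget c downward; recursion depth is r
--     if r == 0:
--         return [[]] if 0 <= c else []
--     res = []
--     for i in range(start, len(items) - r + 1):
--         x = items[i]
--         for t in _combs_le(items, i + 1, r - 1, c - x):
--             res.append([x] + t)
--     return res
--
-- def bounded_subsets_not_sorted(s, c):
--     size = next((i + 2 for i, p in enumerate(accumulate(s)) if p > c), len(s) + 1)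
--     for r in range(size):
--         for t in sorted(_combs_le(s, 0, r, c), key=sum):
--             yield t
-- ===== Notes on version B (the rewrite author's own statement) =====
-- stated objective: alternative
-- what changed: B enumerates each size group with a budget-threading recursion that keeps only the sum-at-most-c subsets, then stable-sorts just the surviving subsets by sum (and computes the size bound from accumulated prefix sums), instead of A's sort-all-combinations-then-filter; only valid subsets are sorted.
import Mathlib
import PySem

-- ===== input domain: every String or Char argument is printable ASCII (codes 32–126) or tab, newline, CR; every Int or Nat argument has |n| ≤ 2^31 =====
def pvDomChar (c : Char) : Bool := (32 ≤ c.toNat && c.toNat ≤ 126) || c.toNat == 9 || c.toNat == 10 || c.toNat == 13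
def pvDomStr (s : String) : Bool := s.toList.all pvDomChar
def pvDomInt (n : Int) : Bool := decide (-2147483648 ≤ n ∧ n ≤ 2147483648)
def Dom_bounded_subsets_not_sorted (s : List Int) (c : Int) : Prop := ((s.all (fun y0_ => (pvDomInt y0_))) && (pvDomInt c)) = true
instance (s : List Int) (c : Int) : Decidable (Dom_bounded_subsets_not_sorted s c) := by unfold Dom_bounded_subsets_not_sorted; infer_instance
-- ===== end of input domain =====

-- B filters each size group to the sum-≤-c subsets BEFORE sorting (threading the remaining
-- budget down a structural recursion) instead of sorting every combination and filtering after;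
-- objective: alternative (sorts only the surviving subsets). A and B are generators in Python;
-- the ports return the list of yielded values.

-- ===== PORT A =====
-- the 'for i in range(len(s)): sum_of_s += s[i]; size += 1; if sum_of_s > c: break' loop
def aSizeLoop (c : Int) : List Int → Int → Int → Int
  | [], _, size => size
  | x :: t, sm, size =>
    let sm := sm + x
    let size := size + 1
    if sm > c then size else aSizeLoop c t sm size

def bounded_subsets_not_sorted (s : List Int) (c : Int) : List (List Int) :=
  let size := aSizeLoop c s 0 1
  (((PySem.List.pyRange 0 size 1).map (fun r =>
      PySem.List.sorted (PySem.List.combinations s r.toNat) (fun t => t.sum) false)).flatten).filter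
    (fun t => decide (t.sum ≤ c))

-- ===== PORT B =====
-- Source B's _combs_le: size-r subsets of items[start:] (index-lexicographic order) with sum ≤ c,
-- budget threaded down; the loop indices i are always in range, so items[i] is pyGetD with a
-- never-used default
def combsLeIdx (items : List Int) (start : Int) (r : Nat) (c : Int) : List (List Int) :=
  match r with
  | 0 => if 0 ≤ c then [[]] else []
  | r + 1 =>
      (PySem.List.pyRange start ((items.length : Int) - (r + 1) + 1) 1).foldl
        (fun res i =>
          let x := PySem.List.pyGetD items i 0
          res ++ (combsLeIdx items (i + 1) r (c - x)).map (fun t => x :: t)) []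

-- next((i + 2 for i, p in enumerate(accumulate(s)) if p > c), len(s) + 1)
def altFindSize (c : Int) : List Int → Int → Int → Int → Int
  | [], _, _, dflt => dflt
  | x :: t, p, i, dflt =>
    let p := p + x
    if p > c then i + 2 else altFindSize c t p (i + 1) dflt

def bounded_subsets_not_sorted_alt (s : List Int) (c : Int) : List (List Int) :=
  let size := altFindSize c s 0 0 ((s.length : Int) + 1)
  ((PySem.List.pyRange 0 size 1).map (fun r =>
      PySem.List.sorted (combsLeIdx s 0 r.toNat c) (fun t => t.sum) false)).flatten

-- ===== PRECONDITION & SPEC =====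
def Spec_bounded_subsets_not_sorted (s : List Int) (c : Int) (out : List (List Int)) : Prop := out = bounded_subsets_not_sorted_alt s c
instance (s : List Int) (c : Int) (out : List (List Int)) : Decidable (Spec_bounded_subsets_not_sorted s c out) := by unfold Spec_bounded_subsets_not_sorted; infer_instance

-- ===== CLAIM (what is proved, stated in full; the proofs are below) =====
def Claim_equal_bounded_subsets_not_sorted : Prop := ∀ (s : List Int) (c : Int), Dom_bounded_subsets_not_sorted s c → Spec_bounded_subsets_not_sorted s c (bounded_subsets_not_sorted s c)

-- ===== LEMMAS AND PROOFS =====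

-- the two size computations agree
theorem aSizeLoop_eq_altFindSize (c : Int) (l : List Int) :
    ∀ (p k : Int), aSizeLoop c l p k = altFindSize c l p (k - 1) (k + l.length) := by
  induction l with
  | nil => intro p k; simp [aSizeLoop, altFindSize]
  | cons x t ih =>
    intro p k
    simp only [aSizeLoop, altFindSize]
    by_cases h : p + x > c
    · simp [h]; omega
    · simp only [h]
      rw [ih (p + x) (k + 1)]
      simp only [List.length_cons]
      norm_num
      congr 1; omega

-- ghost structural variant of _combs_le, used only to organise the proof
def combsStruct : List Int → Nat → Int → List (List Int)
  | _, 0, c => if 0 ≤ c then [[]] else []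
  | [], _ + 1, _ => []
  | x :: rest, r + 1, c =>
      (combsStruct rest r (c - x)).map (fun t => x :: t) ++ combsStruct rest (r + 1) c

-- the structural variant computes the filtered combinations
theorem combsStruct_eq_filter (l : List Int) :
    ∀ (r : Nat) (c : Int),
      combsStruct l r c = (PySem.List.combinations l r).filter (fun t => decide (t.sum ≤ c)) := by
  induction l with
  | nil =>
    intro r c
    cases r with
    | zero => by_cases h : (0:Int) ≤ c <;> simp [combsStruct, PySem.List.combinations_zero, h]
    | succ r => simp [combsStruct, PySem.List.combinations_nil_succ]
  | cons x rest ih =>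
    intro r c
    cases r with
    | zero => by_cases h : (0:Int) ≤ c <;> simp [combsStruct, PySem.List.combinations_zero, h]
    | succ r =>
      simp only [combsStruct, PySem.List.combinations_cons_succ, List.filter_append,
        List.filter_map, ih]
      congr 1
      apply congrArg
      apply List.filter_congr
      intro t _
      simp only [Function.comp_apply, List.sum_cons, decide_eq_decide]
      omega

-- inserting an element whose key is strictly below every key in the list puts it in front
theorem insertBy_eq_cons_of_lt {α : Type} (key : α → Int) (x : α) (l : List α)
    (h : ∀ z ∈ l, key x < key z) :
    PySem.List.insertBy (fun a b => decide (key a < key b)) x l = x :: l := by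
  cases l with
  | nil => rfl
  | cons y ys =>
    have : key x < key y := h y (by simp)
    simp [PySem.List.insertBy, this]

-- insertBy preserves key-sortedness
theorem pairwise_insertBy {α : Type} (key : α → Int) (x : α) (l : List α)
    (h : l.Pairwise (fun a b => key a ≤ key b)) :
    (PySem.List.insertBy (fun a b => decide (key a < key b)) x l).Pairwise
      (fun a b => key a ≤ key b) := by
  induction l with
  | nil => simp [PySem.List.insertBy]
  | cons y ys ih =>
    rcases List.pairwise_cons.mp h with ⟨hy, hys⟩
    by_cases hlt : key x < key y
    · simp only [PySem.List.insertBy, hlt, decide_true, if_true]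
      refine List.pairwise_cons.mpr ⟨?_, h⟩
      intro z hz
      rcases List.mem_cons.mp hz with hz | hz
      · subst hz; omega
      · exact le_trans (le_of_lt hlt) (hy z hz)
    · simp only [PySem.List.insertBy, hlt, decide_false]
      refine List.pairwise_cons.mpr ⟨?_, ih hys⟩
      intro z hz
      rcases (PySem.List.mem_insertBy _ x z ys).mp hz with hz | hz
      · subst hz; omega
      · exact hy z hz

-- filtering commutes with inserting into a key-sorted list
theorem filter_insertBy {α : Type} (key : α → Int) (p : α → Bool) (x : α) (l : List α)
    (h : l.Pairwise (fun a b => key a ≤ key b)) :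
    (PySem.List.insertBy (fun a b => decide (key a < key b)) x l).filter p =
      if p x then PySem.List.insertBy (fun a b => decide (key a < key b)) x (l.filter p)
      else l.filter p := by
  induction l with
  | nil => cases hpx : p x <;> simp [PySem.List.insertBy, List.filter, hpx]
  | cons y ys ih =>
    rcases List.pairwise_cons.mp h with ⟨hy, hys⟩
    by_cases hlt : key x < key y
    · simp only [PySem.List.insertBy, hlt, decide_true, if_true]
      cases hpx : p x with
      | false => simp [List.filter, hpx]
      | true =>
        simp only [List.filter, hpx, if_true]
        cases hpy : p y with
        | true => simp [PySem.List.insertBy, hlt]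
        | false =>
          rw [insertBy_eq_cons_of_lt key x (ys.filter p)]
          intro z hz
          have hzys : z ∈ ys := (List.mem_filter.mp hz).1
          exact lt_of_lt_of_le hlt (hy z hzys)
    · have hins : ∀ l : List α,
          PySem.List.insertBy (fun a b => decide (key a < key b)) x (y :: l) =
            y :: PySem.List.insertBy (fun a b => decide (key a < key b)) x l := by
        intro l; simp [PySem.List.insertBy, hlt]
      rw [hins]
      cases hpy : p y with
      | true =>
        simp only [List.filter_cons, hpy, if_true, ih hys, hins]
        cases hpx : p x <;> simp
      | false =>
        simp only [List.filter_cons, hpy, ih hys]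
        simp

-- stable sorting commutes with filtering
theorem sorted_filter_comm {α : Type} (key : α → Int) (p : α → Bool) (xs : List α) :
    (PySem.List.sorted xs key).filter p = PySem.List.sorted (xs.filter p) key := by
  rw [PySem.List.sorted_eq_foldl_insertBy, PySem.List.sorted_eq_foldl_insertBy]
  suffices haux : ∀ (l : List α) (acc : List α),
      acc.Pairwise (fun a b => key a ≤ key b) →
      (l.foldl (fun acc x => PySem.List.insertBy (fun a b => decide (key a < key b)) x acc)
          acc).filter p =
        (l.filter p).foldl
          (fun acc x => PySem.List.insertBy (fun a b => decide (key a < key b)) x acc)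
          (acc.filter p) by
    simpa using haux xs [] (by simp)
  intro l
  induction l with
  | nil => intro acc _; simp
  | cons x t ih =>
    intro acc hacc
    simp only [List.foldl_cons, List.filter]
    rw [ih _ (pairwise_insertBy key x acc hacc), filter_insertBy key p x acc hacc]
    cases hpx : p x <;> simp


-- the indexed recursion written as a flatMap over its index range
theorem combsLeIdx_succ_flatMap (items : List Int) (start : Int) (r : Nat) (c : Int) :
    combsLeIdx items start (r + 1) c =
      (PySem.List.pyRange start ((items.length : Int) - (r + 1) + 1) 1).flatMap
        (fun i => (combsLeIdx items (i + 1) r (c - PySem.List.pyGetD items i 0)).map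
          (fun t => PySem.List.pyGetD items i 0 :: t)) := by
  simp [combsLeIdx, List.flatMap_def]

theorem combsStruct_eq_nil_of_short (l : List Int) (r : Nat) (c : Int)
    (h : l.length < r) : combsStruct l r c = [] := by
  rw [combsStruct_eq_filter, PySem.List.combinations_eq_nil_of_length_lt _ h]
  rfl

-- the indexed recursion of Source B computes the structural variant on the suffix
theorem combsLeIdx_eq_combsStruct (items : List Int) :
    ∀ (n start : Nat), items.length ≤ start + n →
      ∀ (r : Nat) (c : Int),
        combsLeIdx items (start : Int) r c = combsStruct (items.drop start) r c := by
  intro n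
  induction n with
  | zero =>
    intro start hle r c
    rw [List.drop_eq_nil_of_le (by omega)]
    cases r with
    | zero => simp [combsLeIdx, combsStruct]
    | succ r =>
      rw [combsLeIdx_succ_flatMap, PySem.List.pyRange_one_eq_nil (by omega)]
      simp [combsStruct]
  | succ n ih =>
    intro start hle r c
    by_cases hs : items.length ≤ start
    · exact ih start (by omega) r c
    · rw [Nat.not_le] at hs
      cases r with
      | zero => simp [combsLeIdx, combsStruct]
      | succ r =>
        have hdrop : items.drop start = items[start] :: items.drop (start + 1) :=
          List.drop_eq_getElem_cons hs
        have hget : PySem.List.pyGetD items (start : Int) 0 = items[start] := by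
          rw [PySem.List.pyGetD_eq_getElem items 0 (by positivity) (by omega)]
          simp
        by_cases hlt : (start : Int) < (items.length : Int) - (r + 1) + 1
        · rw [combsLeIdx_succ_flatMap, PySem.List.pyRange_one_cons hlt, List.flatMap_cons,
            hdrop]
          have hcast : (start : Int) + 1 = ((start + 1 : Nat) : Int) := by push_cast; ring
          rw [hget, hcast, ih (start + 1) (by omega) r (c - items[start])]
          show _ ++ _ = combsStruct (items[start] :: items.drop (start + 1)) (r + 1) c
          rw [combsStruct]
          congr 1
          rw [← combsLeIdx_succ_flatMap, hcast] at *
          exact ih (start + 1) (by omega) (r + 1) c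
        · rw [combsLeIdx_succ_flatMap, PySem.List.pyRange_one_eq_nil (by omega)]
          rw [combsStruct_eq_nil_of_short _ _ _ (by simp [List.length_drop]; omega)]
          rfl

-- Source B's _combs_le computes the filtered combinations
theorem combsLeIdx_eq_filter (items : List Int) (r : Nat) (c : Int) :
    combsLeIdx items 0 r c =
      (PySem.List.combinations items r).filter (fun t => decide (t.sum ≤ c)) := by
  have h := combsLeIdx_eq_combsStruct items items.length 0 (by omega) r c
  simp only [Nat.cast_zero, List.drop_zero] at h
  rw [h, combsStruct_eq_filter]

-- ===== VERDICT (by name: the statement is the Claim_ definition above) =====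
theorem bounded_subsets_not_sorted_spec : Claim_equal_bounded_subsets_not_sorted := by
  intro s c _
  unfold Spec_bounded_subsets_not_sorted bounded_subsets_not_sorted bounded_subsets_not_sorted_alt
  have hsize : aSizeLoop c s 0 1 = altFindSize c s 0 0 ((s.length : Int) + 1) := by
    rw [aSizeLoop_eq_altFindSize c s 0 1, show (1:Int) - 1 = 0 from rfl,
      add_comm (1:Int) (s.length : Int)]
  rw [hsize, List.filter_flatten, List.map_map]
  congr 1
  apply List.map_congr_left
  intro r _
  simp only [Function.comp]
  rw [sorted_filter_comm, combsLeIdx_eq_filter]
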